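-- pv_equiv track=rewrite | github.com/pypi-data/pypi-mirror-312 | packages/algoseek-connector/algoseek_connector-2.1.5-py3-none-any.whl/algoseek_connector/s3/downloader.py | _split_path_format
-- ===== SOURCE A (Python) =====
-- def _split_path_format(path_format: str, prefix_sep: str, name_sep: str) -> list[str]:
--     """Split a path format into parts of prefixes, separators and names."""
--     prefix_parts = path_format.split(prefix_sep)
--     name = prefix_parts.pop()
--
--     parts = list()
--     for part in prefix_parts:
--         parts.append(part)
--         parts.append(prefix_sep)
--
--     for part in name.split(name_sep):
--         parts.append(part)
--         parts.append(name_sep)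
--
--     parts.pop()  # remove separator token added at the end by _create_tokens
--     return parts
-- ===== SOURCE B (Python) =====
-- def _split_path_format(path_format: str, prefix_sep: str, name_sep: str) -> list[str]:
--     """Split a path format into parts of prefixes, separators and names.
--
--     Single left-to-right scan: peel tokens off the front with str.partition
--     instead of splitting into lists and interleaving separators afterwards.
--     """
--     tokens = []
--     rest = path_format
--     for sep in (prefix_sep, name_sep):
--         while sep in rest:
--             head, _, rest = rest.partition(sep)
--             tokens += [head, sep]
--     tokens.append(rest)
--     return tokens
-- ===== Notes on version B (the rewrite author's own statement) =====
-- stated objective: alternative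
-- what changed: B replaces A's split-into-lists-then-interleave-then-pop construction by a single left-to-right scan that peels one token at a time off the front with str.partition.
import Mathlib
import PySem

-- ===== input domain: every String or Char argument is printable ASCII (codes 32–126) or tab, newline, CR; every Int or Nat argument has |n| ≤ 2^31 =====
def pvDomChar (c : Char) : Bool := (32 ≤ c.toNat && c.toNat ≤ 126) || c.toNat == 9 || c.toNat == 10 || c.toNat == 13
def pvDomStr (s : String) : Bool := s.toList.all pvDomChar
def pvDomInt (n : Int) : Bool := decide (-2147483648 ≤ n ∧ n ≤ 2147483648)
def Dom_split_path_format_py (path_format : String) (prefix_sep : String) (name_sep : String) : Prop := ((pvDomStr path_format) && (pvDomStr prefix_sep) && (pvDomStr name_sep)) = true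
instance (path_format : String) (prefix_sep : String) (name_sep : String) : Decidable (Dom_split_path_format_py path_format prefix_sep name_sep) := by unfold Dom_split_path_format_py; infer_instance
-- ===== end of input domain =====

-- B replaces A's split-then-interleave construction by a single left-to-right partition scan (objective: alternative, same cost).

-- ===== PORT A =====
def split_path_format_py (path_format : String) (prefix_sep : String) (name_sep : String) : List String :=
  match PySem.Str.split? path_format prefix_sep with
  | none => []  -- unreachable under Pre_ (str.split raises ValueError on an empty separator)
  | some prefix_parts0 =>
    let name := (prefix_parts0.getLast?).getD ""            -- prefix_parts.pop()
    let prefix_parts := prefix_parts0.dropLast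
    let parts := prefix_parts.foldl (fun acc part => acc ++ [part, prefix_sep]) []
    match PySem.Str.split? name name_sep with
    | none => []  -- unreachable under Pre_
    | some name_parts =>
      (name_parts.foldl (fun acc part => acc ++ [part, name_sep]) parts).dropLast  -- parts.pop()

-- ===== PORT B =====
-- hand port of str.partition's search (exact: splits at the FIRST index where sep is a prefix; none = not found)
def pvPartC (sep : List Char) : List Char → Option (List Char × List Char)
  | [] => if sep.isPrefixOf ([] : List Char) then some ([], []) else none
  | c :: rest =>
    if sep.isPrefixOf (c :: rest) then some ([], List.drop sep.length (c :: rest))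
    else (pvPartC sep rest).map (fun p => (c :: p.1, p.2))

-- the 'while sep in rest' loop of B; fuel only makes it total (rest.length + 1 always suffices when sep ≠ "")
def pvScan (sep : List Char) : Nat → List Char → List (List Char) × List Char
  | 0, rest => ([], rest)
  | fuel + 1, rest =>
    if PySem.Chars.isIn sep rest then
      match pvPartC sep rest with
      | none => ([], rest)  -- unreachable: sep was found in rest
      | some p =>
        let q := pvScan sep fuel p.2
        (p.1 :: sep :: q.1, q.2)
    else ([], rest)

def split_path_format_py_alt (path_format : String) (prefix_sep : String) (name_sep : String) : List String :=
  let s1 := pvScan prefix_sep.toList (path_format.toList.length + 1) path_format.toList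
  let s2 := pvScan name_sep.toList (s1.2.length + 1) s1.2
  ((s1.1 ++ s2.1) ++ [s2.2]).map String.ofList

-- ===== PRECONDITION & SPEC =====
-- Pre_ excludes exactly the inputs where A raises: str.split raises ValueError when a separator is empty.
def Pre_split_path_format_py (path_format : String) (prefix_sep : String) (name_sep : String) : Prop :=
  prefix_sep ≠ "" ∧ name_sep ≠ ""
instance (path_format : String) (prefix_sep : String) (name_sep : String) : Decidable (Pre_split_path_format_py path_format prefix_sep name_sep) := by unfold Pre_split_path_format_py; infer_instance

def pvWitness_split_path_format_py : String × String × String := ("yyyy/mm/dd.name.csv", "/", ".")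

def Spec_split_path_format_py (path_format : String) (prefix_sep : String) (name_sep : String) (out : List String) : Prop := out = split_path_format_py_alt path_format prefix_sep name_sep
instance (path_format : String) (prefix_sep : String) (name_sep : String) (out : List String) : Decidable (Spec_split_path_format_py path_format prefix_sep name_sep out) := by unfold Spec_split_path_format_py; infer_instance

-- ===== CLAIM (what is proved, stated in full; the proofs are below) =====
def Claim_equal_split_path_format_py : Prop := ∀ (path_format : String) (prefix_sep : String) (name_sep : String), Dom_split_path_format_py path_format prefix_sep name_sep → Pre_split_path_format_py path_format prefix_sep name_sep → Spec_split_path_format_py path_format prefix_sep name_sep (split_path_format_py path_format prefix_sep name_sep)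

-- ===== LEMMAS AND PROOFS =====

-- the split of l by sep as a first-occurrence recursion (proof-side; fuel for totality)
def pvPartsF (sep : List Char) : Nat → List Char → List (List Char)
  | 0, l => [l]
  | fuel + 1, l =>
    match pvPartC sep l with
    | none => [l]
    | some p => p.1 :: pvPartsF sep fuel p.2

def pvParts (sep l : List Char) : List (List Char) := pvPartsF sep (l.length + 1) l

def pvConsHead (pre : List Char) : List (List Char) → List (List Char)
  | [] => [pre]
  | p :: ps => (pre ++ p) :: ps

theorem pvPartC_lt {sep : List Char} (hsep : sep ≠ []) :
    ∀ {l b a : List Char}, pvPartC sep l = some (b, a) → a.length < l.length := by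
  intro l
  induction l with
  | nil =>
    intro b a h
    simp only [pvPartC] at h
    have : ¬ sep.isPrefixOf ([] : List Char) = true := by
      simp [List.isPrefixOf_iff_prefix, List.prefix_nil, hsep]
    simp [this] at h
  | cons c rest ih =>
    intro b a h
    simp only [pvPartC] at h
    split at h
    · rename_i hpre
      obtain ⟨h1, h2⟩ := Prod.mk.injEq .. ▸ (Option.some.injEq .. ▸ h)
      subst h2
      have hslen : 1 ≤ sep.length := List.length_pos_iff.mpr hsep
      simp only [List.length_drop, List.length_cons]
      omega
    · rcases hrec : pvPartC sep rest with _ | ⟨b', a'⟩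
      · simp [hrec] at h
      · simp only [hrec, Option.map_some] at h
        obtain ⟨h1, h2⟩ := Prod.mk.injEq .. ▸ (Option.some.injEq .. ▸ h)
        subst h2
        have := ih hrec
        simp only [List.length_cons]
        omega

theorem pvPartC_none_iff (sep : List Char) :
    ∀ l : List Char, pvPartC sep l = none ↔ ¬ sep <:+: l := by
  intro l
  induction l with
  | nil =>
    simp only [pvPartC]
    by_cases h : sep.isPrefixOf ([] : List Char) = true
    · have : sep = [] := by simpa [List.isPrefixOf_iff_prefix, List.prefix_nil] using h
      subst this; simp [h]
    · have hne : sep ≠ [] := by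
        intro hs; subst hs; simp [List.isPrefixOf_iff_prefix] at h
      simp [h, List.infix_nil, hne]
  | cons c rest ih =>
    simp only [pvPartC]
    by_cases h : sep.isPrefixOf (c :: rest)
    · have : sep <:+: c :: rest := (List.isPrefixOf_iff_prefix.mp h).isInfix
      simp [h, this]
    · have hnp : ¬ sep <+: c :: rest := fun hc => h (List.isPrefixOf_iff_prefix.mpr hc)
      simp [h, ih, List.infix_cons_iff, hnp]

theorem pvPartsF_stable {sep : List Char} (hsep : sep ≠ []) :
    ∀ (f g : Nat) (l : List Char), l.length < f → l.length < g → pvPartsF sep f l = pvPartsF sep g l := by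
  intro f
  induction f with
  | zero => intro g l hf; omega
  | succ f ih =>
    intro g l hf hg
    obtain ⟨g', rfl⟩ : ∃ g', g = g' + 1 := ⟨g - 1, by omega⟩
    simp only [pvPartsF]
    rcases hp : pvPartC sep l with _ | ⟨b, a⟩
    · rfl
    · have hlt := pvPartC_lt hsep hp
      simp only []
      rw [ih g' a (by omega) (by omega)]

theorem pvParts_unfold {sep : List Char} (hsep : sep ≠ []) (l : List Char) :
    pvParts sep l = match pvPartC sep l with
      | none => [l]
      | some p => p.1 :: pvParts sep p.2 := by
  show pvPartsF sep (l.length + 1) l = _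
  simp only [pvPartsF]
  rcases hp : pvPartC sep l with _ | ⟨b, a⟩
  · rfl
  · have hlt := pvPartC_lt hsep hp
    show _ :: pvPartsF sep l.length a = _ :: pvParts sep a
    rw [pvPartsF_stable hsep l.length (a.length + 1) a (by omega) (by omega)]
    rfl

theorem pvParts_ne_nil (sep l : List Char) : pvParts sep l ≠ [] := by
  show pvPartsF sep (l.length + 1) l ≠ []
  simp only [pvPartsF]
  rcases pvPartC sep l with _ | p <;> simp

theorem pvGo_eq {sep : List Char} (hsep : sep ≠ []) :
    ∀ (fuel : Nat) (l cur : List Char) (accL : List (List Char)), l.length < fuel →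
      PySem.Chars.splitOn.go sep fuel l cur accL = accL.reverse ++ pvConsHead cur.reverse (pvParts sep l) := by
  intro fuel
  induction fuel with
  | zero => intro l cur accL h; omega
  | succ fuel ih =>
    intro l cur accL h
    cases l with
    | nil =>
      have hP : pvParts sep [] = [[]] := by
        rw [pvParts_unfold hsep]
        have : pvPartC sep [] = none := by
          rw [pvPartC_none_iff]; simp [List.infix_nil, hsep]
        rw [this]
      rw [hP]
      simp [PySem.Chars.splitOn.go, pvConsHead]
    | cons c rest =>
      rw [PySem.Chars.splitOn.go]
      by_cases hpre : sep.isPrefixOf (c :: rest) = true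
      · have hdrop : (List.drop sep.length (c :: rest)).length < fuel := by
          have : 1 ≤ sep.length := List.length_pos_iff.mpr hsep
          simp only [List.length_drop, List.length_cons] at *
          omega
        rw [if_pos hpre, ih _ _ _ hdrop]
        have hP : pvParts sep (c :: rest) = [] :: pvParts sep (List.drop sep.length (c :: rest)) := by
          rw [pvParts_unfold hsep]
          have : pvPartC sep (c :: rest) = some ([], List.drop sep.length (c :: rest)) := by
            simp [pvPartC, hpre]
          rw [this]
        rw [hP]
        cases hQ : pvParts sep (List.drop sep.length (c :: rest)) with
        | nil => exact absurd hQ (pvParts_ne_nil _ _)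
        | cons q qs => simp [pvConsHead]
      · have hrest : rest.length < fuel := by simp at h; omega
        rw [if_neg hpre, ih _ _ _ hrest]
        congr 1
        have hPc : pvPartC sep (c :: rest) = (pvPartC sep rest).map (fun p => (c :: p.1, p.2)) := by
          simp [pvPartC, hpre]
        rcases hq : pvPartC sep rest with _ | ⟨b, a⟩
        · have h1 : pvParts sep (c :: rest) = [c :: rest] := by
            rw [pvParts_unfold hsep, hPc, hq]; rfl
          have h2 : pvParts sep rest = [rest] := by
            rw [pvParts_unfold hsep, hq]
          rw [h1, h2]
          simp [pvConsHead]
        · have h1 : pvParts sep (c :: rest) = (c :: b) :: pvParts sep a := by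
            rw [pvParts_unfold hsep, hPc, hq]; rfl
          have h2 : pvParts sep rest = b :: pvParts sep a := by
            rw [pvParts_unfold hsep, hq]
          rw [h1, h2]
          simp [pvConsHead]

theorem pvSplitOn_eq_parts {sep : List Char} (hsep : sep ≠ []) (l : List Char) :
    PySem.Chars.splitOn l sep = pvParts sep l := by
  rw [PySem.Chars.splitOn, pvGo_eq hsep _ _ _ _ (by omega)]
  cases hQ : pvParts sep l with
  | nil => exact absurd hQ (pvParts_ne_nil _ _)
  | cons q qs => simp [pvConsHead]

theorem pvGetLastD_cons {α : Type} (b d : α) (l : List α) (h : l ≠ []) :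
    (b :: l).getLastD d = l.getLastD d := by
  cases l with
  | nil => exact absurd rfl h
  | cons x xs => simp [List.getLastD_cons]

theorem pvScan_eq {sep : List Char} (hsep : sep ≠ []) :
    ∀ (fuel : Nat) (l : List Char), l.length < fuel →
      pvScan sep fuel l = ((pvParts sep l).dropLast.flatMap (fun p => [p, sep]), (pvParts sep l).getLastD []) := by
  intro fuel
  induction fuel with
  | zero => intro l h; omega
  | succ fuel ih =>
    intro l h
    rw [pvScan]
    by_cases hin : PySem.Chars.isIn sep l = true
    · have hinf : sep <:+: l := (PySem.Chars.isIn_iff_infix sep l).mp hin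
      rcases hq : pvPartC sep l with _ | ⟨b, a⟩
      · exact absurd hinf ((pvPartC_none_iff sep l).mp hq)
      · have hlt := pvPartC_lt hsep hq
        rw [if_pos hin]
        dsimp only
        rw [ih a (by omega)]
        have hP : pvParts sep l = b :: pvParts sep a := by
          rw [pvParts_unfold hsep, hq]
        rw [hP, List.dropLast_cons_of_ne_nil (pvParts_ne_nil sep a),
            pvGetLastD_cons _ _ _ (pvParts_ne_nil sep a)]
        simp
    · have hq : pvPartC sep l = none :=
        (pvPartC_none_iff sep l).mpr ((PySem.Chars.isIn_eq_false_iff sep l).mp (by simpa using hin))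
      have hP : pvParts sep l = [l] := by
        rw [pvParts_unfold hsep, hq]
      rw [if_neg hin, hP]
      simp

theorem pvDropLast_flatMap (sepS : String) (f : List Char → String) :
    ∀ ps : List (List Char), ps ≠ [] →
      ((ps.map f).flatMap (fun p => [p, sepS])).dropLast
        = ((ps.dropLast.map f).flatMap (fun p => [p, sepS])) ++ [f (ps.getLastD [])] := by
  intro ps
  induction ps with
  | nil => intro h; exact absurd rfl h
  | cons p ps ih =>
    intro _
    cases ps with
    | nil => simp
    | cons q r =>
      have hne : ((q :: r).map f).flatMap (fun p => [p, sepS]) ≠ [] := by simp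
      rw [show ((p :: q :: r).map f).flatMap (fun p => [p, sepS])
            = [f p, sepS] ++ ((q :: r).map f).flatMap (fun p => [p, sepS]) by simp]
      rw [List.dropLast_append_of_ne_nil hne, ih (by simp)]
      simp [List.getLastD_cons]

theorem pvFlatMap_ne_nil (sepS : String) (ps : List String) (h : ps ≠ []) :
    ps.flatMap (fun p => [p, sepS]) ≠ [] := by
  cases ps with
  | nil => exact absurd rfl h
  | cons q r => simp

-- ===== VERDICT (by name: the statement is the Claim_ definition above) =====
theorem split_path_format_py_spec : Claim_equal_split_path_format_py := by
  intro path psep nsep _ hpre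
  obtain ⟨h1, h2⟩ := hpre
  have hpc : psep.toList ≠ [] := fun hh => h1 (String.toList_eq_nil_iff.mp hh)
  have hnc : nsep.toList ≠ [] := fun hh => h2 (String.toList_eq_nil_iff.mp hh)
  unfold Spec_split_path_format_py
  set P := pvParts psep.toList path.toList with hP
  set nameC := P.getLastD [] with hnameC
  set N := pvParts nsep.toList nameC with hN
  have hsplit1 : PySem.Str.split? path psep = some (P.map String.ofList) := by
    simp only [PySem.Str.split?, PySem.Chars.split?]
    rw [if_neg (by simp [List.isEmpty_iff, hpc]), pvSplitOn_eq_parts hpc]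
    rfl
  have hlast : (P.map String.ofList).getLast? = some (String.ofList nameC) := by
    rcases hl : P.getLast? with _ | x
    · exact absurd (List.getLast?_eq_none_iff.mp hl) (pvParts_ne_nil _ _)
    · rw [List.getLast?_map, hl, hnameC, List.getLastD_eq_getLast?, hl]
      rfl
  have hsplit2 : PySem.Str.split? (String.ofList nameC) nsep = some (N.map String.ofList) := by
    simp only [PySem.Str.split?, PySem.Chars.split?]
    rw [if_neg (by simp [List.isEmpty_iff, hnc])]
    rw [String.toList_ofList, pvSplitOn_eq_parts hnc]
    rfl
  -- evaluate port A
  have hA : split_path_format_py path psep nsep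
      = ((P.dropLast.map String.ofList).flatMap (fun p => [p, psep])
          ++ ((N.map String.ofList).flatMap (fun p => [p, nsep])).dropLast) := by
    rw [split_path_format_py, hsplit1]
    dsimp only
    rw [hlast]
    dsimp only [Option.getD_some]
    rw [hsplit2]
    dsimp only
    rw [PySem.List.foldl_append_eq_flatMap, PySem.List.foldl_append_eq_flatMap]
    rw [List.map_dropLast, List.nil_append,
        List.dropLast_append_of_ne_nil
          (pvFlatMap_ne_nil nsep (N.map String.ofList) (by simpa [hN] using pvParts_ne_nil nsep.toList nameC))]
  rw [hA, pvDropLast_flatMap nsep String.ofList N (pvParts_ne_nil _ _)]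
  -- evaluate port B
  rw [split_path_format_py_alt]
  rw [pvScan_eq hpc _ _ (by omega)]
  dsimp only
  rw [← hP, ← hnameC, pvScan_eq hnc _ _ (by omega), ← hN]
  simp [List.map_flatMap, List.flatMap_map, String.ofList_toList, Function.comp]
  simp [← List.map_dropLast, List.flatMap_map]
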